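-- pv_equiv track=rewrite | github.com/cct823/IST341_Course_Work | week6/hw9pr1/hw9pr1.py | innerCells
-- ===== SOURCE A (Python) =====
-- def createOneRow(w):
--     """ returns one row of zeros of width "width"...
--          You might use this in your createBoard(width, height) function """
--     row = []
--     for col in range(w):
--         row += [0]
--     return row
--
-- def createBoard(w, h):
--     """Returns a 2D array with "height" rows and "width" columns."""
--     A = []
--     for row in range(h):
--         A += [createOneRow(w)]       # use the above function so that SOMETHING is one row!!
--     return A
--
-- def innerCells(w, h):
--     '''create a board that has all live cells'''
--     A = createBoard(w, h)
--
--     for row in range(1, h - 1):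
--         for col in range(1, w - 1):
--             if  0 < row < h-1 and 0 < col < w-1:
--                 A[row][col] = 1
--             else:
--                 A[row][col] = 0
--     return A
-- ===== SOURCE B (Python) =====
-- def innerCells(w, h):
--     '''create a board that has all live cells'''
--     height = max(h, 0)
--     if height == 0:
--         return []
--     zeros = [0] * max(w, 0)
--     inner = zeros if w < 2 else [0] + [1] * (w - 2) + [0]
--     return [list(zeros) if r == 0 or r == h - 1 else list(inner)
--             for r in range(height)]
-- ===== Notes on version B (the rewrite author's own statement) =====
-- stated objective: simpler
-- what changed: Replaces the allocate-then-overwrite cell-by-cell double loop with direct row templates: one zero row and one interior row built by list repetition, assembled in a single pass over row indices.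
import Mathlib
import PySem

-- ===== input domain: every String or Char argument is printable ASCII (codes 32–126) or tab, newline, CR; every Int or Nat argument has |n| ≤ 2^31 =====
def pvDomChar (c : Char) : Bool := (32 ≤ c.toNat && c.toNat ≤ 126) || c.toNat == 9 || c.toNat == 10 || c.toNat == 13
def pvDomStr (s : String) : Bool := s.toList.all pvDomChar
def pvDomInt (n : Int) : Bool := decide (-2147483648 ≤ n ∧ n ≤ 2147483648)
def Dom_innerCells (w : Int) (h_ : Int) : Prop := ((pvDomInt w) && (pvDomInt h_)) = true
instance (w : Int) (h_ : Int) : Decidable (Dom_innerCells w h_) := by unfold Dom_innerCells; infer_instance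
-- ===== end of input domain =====

-- ===== PORT A =====
-- Header: B replaces A's allocate-then-overwrite double loop with direct row templates (simpler).
-- A[row][col] = v is ported as modify/set at .toNat indices: exact here, since the loop indices
-- are ≥ 1 and strictly below the row/column count, so Python never raises IndexError.
def createOneRow (w : Int) : List Int :=
  (PySem.List.pyRange 0 w 1).foldl (fun row _ => row ++ [0]) []

def createBoard (w : Int) (h_ : Int) : List (List Int) :=
  (PySem.List.pyRange 0 h_ 1).foldl (fun A _ => A ++ [createOneRow w]) []

def innerCells (w : Int) (h_ : Int) : List (List Int) :=
  (PySem.List.pyRange 1 (h_ - 1) 1).foldl (fun A row =>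
    (PySem.List.pyRange 1 (w - 1) 1).foldl (fun A col =>
      if 0 < row ∧ row < h_ - 1 ∧ 0 < col ∧ col < w - 1 then
        A.modify row.toNat (fun r => r.set col.toNat 1)
      else
        A.modify row.toNat (fun r => r.set col.toNat 0)) A)
    (createBoard w h_)

-- ===== PORT B =====
def innerCells_alt (w : Int) (h_ : Int) : List (List Int) :=
  if (max h_ 0).toNat = 0 then []
  else
    let width := (max w 0).toNat
    let zeros := List.replicate width (0 : Int)
    let inner := if w < 2 then zeros else [0] ++ List.replicate (w - 2).toNat 1 ++ [0]
    (PySem.List.pyRange 0 (max h_ 0) 1).map (fun r =>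
      if r = 0 ∨ r = h_ - 1 then zeros else inner)

-- ===== PRECONDITION & SPEC =====
def Spec_innerCells (w : Int) (h_ : Int) (out : List (List Int)) : Prop := out = innerCells_alt w h_
instance (w : Int) (h_ : Int) (out : List (List Int)) : Decidable (Spec_innerCells w h_ out) := by unfold Spec_innerCells; infer_instance

-- ===== CLAIM (what is proved, stated in full; the proofs are below) =====
def Claim_equal_innerCells : Prop := ∀ (w : Int) (h_ : Int), Dom_innerCells w h_ → Spec_innerCells w h_ (innerCells w h_)

-- ===== LEMMAS AND PROOFS =====

-- createOneRow is a row of w zeros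
lemma createOneRow_eq (w : Int) : createOneRow w = List.replicate w.toNat (0 : Int) := by
  unfold createOneRow
  rw [PySem.List.foldl_append_singleton_eq_map (fun _ => (0 : Int))]
  simp [List.map_const', PySem.List.length_pyRange_one]

-- createBoard is h rows of w zeros
lemma createBoard_eq (w h_ : Int) :
    createBoard w h_ = List.replicate h_.toNat (List.replicate w.toNat (0 : Int)) := by
  unfold createBoard
  rw [PySem.List.foldl_append_singleton_eq_map (fun _ => createOneRow w)]
  simp [List.map_const', PySem.List.length_pyRange_one, createOneRow_eq]

-- length of a fold of sets
lemma length_foldl_set (cols : List Int) (v : Int) :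
    ∀ row : List Int, (cols.foldl (fun r c => r.set c.toNat v) row).length = row.length := by
  induction cols with
  | nil => intro row; rfl
  | cons c cs ih => intro row; simp [List.foldl_cons, ih]

-- element of a fold of sets: v where some index hits, untouched elsewhere
lemma getElem_foldl_set (cols : List Int) (v : Int) :
    ∀ (row : List Int) (j : Nat) (hj : j < row.length)
      (hj' : j < (cols.foldl (fun r c => r.set c.toNat v) row).length),
      (cols.foldl (fun r c => r.set c.toNat v) row)[j] =
        if ∃ c ∈ cols, c.toNat = j then v else row[j] := by
  induction cols with
  | nil => intro row j hj hj'; simp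
  | cons c cs ih =>
    intro row j hj hj'
    have hlen : j < (row.set c.toNat v).length := by simpa using hj
    simp only [List.foldl_cons]
    simp only [ih (row.set c.toNat v) j hlen (by simpa [length_foldl_set] using hlen)]
    rw [List.getElem_set]
    by_cases hc : c.toNat = j
    · simp [hc]
    · by_cases hcs : ∃ x ∈ cs, x.toNat = j
      · simp [hc, hcs]
      · simp [hc, hcs]

-- length of a fold of modifies
lemma length_foldl_modify (rows : List Int) (g : List Int → List Int) :
    ∀ A : List (List Int),
      (rows.foldl (fun A r => A.modify r.toNat g) A).length = A.length := by
  induction rows with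
  | nil => intro A; rfl
  | cons r rs ih => intro A; simp [List.foldl_cons, ih]

-- element of a fold of modifies with an idempotent g
lemma getElem_foldl_modify (rows : List Int) (g : List Int → List Int)
    (hg : ∀ x, g (g x) = g x) :
    ∀ (A : List (List Int)) (i : Nat) (hi : i < A.length)
      (hi' : i < (rows.foldl (fun A r => A.modify r.toNat g) A).length),
      (rows.foldl (fun A r => A.modify r.toNat g) A)[i] =
        if ∃ r ∈ rows, r.toNat = i then g A[i] else A[i] := by
  induction rows with
  | nil => intro A i hi hi'; simp
  | cons r rs ih =>
    intro A i hi hi'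
    have hlen : i < (A.modify r.toNat g).length := by simpa using hi
    simp only [List.foldl_cons]
    simp only [ih (A.modify r.toNat g) i hlen (by simpa [length_foldl_modify] using hlen)]
    rw [List.getElem_modify]
    by_cases hr : r.toNat = i
    · by_cases hrs : ∃ x ∈ rs, x.toNat = i
      · simp [hr, hrs, hg]
      · simp [hr, hrs]
    · by_cases hrs : ∃ x ∈ rs, x.toNat = i
      · simp [hr, hrs]
      · simp [hr, hrs]

-- the per-row update A's inner loop performs, as a row function
def setCols (w : Int) (row : List Int) : List Int :=
  (PySem.List.pyRange 1 (w - 1) 1).foldl (fun r c => r.set c.toNat (1 : Int)) row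

lemma length_setCols (w : Int) (row : List Int) : (setCols w row).length = row.length :=
  length_foldl_set _ _ row

lemma getElem_setCols (w : Int) (row : List Int) (j : Nat) (hj : j < row.length)
    (hj' : j < (setCols w row).length) :
    (setCols w row)[j] = if 1 ≤ (j : Int) ∧ (j : Int) < w - 1 then 1 else row[j] := by
  unfold setCols
  rw [getElem_foldl_set _ _ row j hj hj']
  congr 1
  simp only [PySem.List.mem_pyRange_one, eq_iff_iff]
  constructor
  · rintro ⟨c, ⟨h1, h2⟩, rfl⟩; omega
  · rintro ⟨h1, h2⟩; exact ⟨(j : Int), ⟨by omega, by omega⟩, by omega⟩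

lemma setCols_idem (w : Int) (row : List Int) : setCols w (setCols w row) = setCols w row := by
  apply List.ext_getElem
  · simp [length_setCols]
  · intro j hj hj'
    rw [getElem_setCols w _ j (by simpa [length_setCols] using hj') (by simpa [length_setCols] using hj'),
        getElem_setCols w row j (by simpa [length_setCols] using hj') hj']
    split_ifs with h <;> rfl

-- modify with the identity / fused modifies (no library lemma matched these)
lemma modify_id_eq (A : List (List Int)) (i : Nat) : A.modify i (fun x => x) = A := by
  apply List.ext_getElem
  · simp
  · intro j hj hj'
    rw [List.getElem_modify]
    split_ifs <;> rfl

lemma modify_modify_eq (A : List (List Int)) (i : Nat) (f g : List Int → List Int) :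
    (A.modify i f).modify i g = A.modify i (fun x => g (f x)) := by
  apply List.ext_getElem
  · simp
  · intro j hj hj'
    rw [List.getElem_modify, List.getElem_modify, List.getElem_modify]
    split_ifs with h <;> simp

-- the inner loop of A, over in-range row and col, is modify by setCols
lemma innerCells_eq_foldl_modify (w h_ : Int) :
    innerCells w h_ =
      (PySem.List.pyRange 1 (h_ - 1) 1).foldl
        (fun A row => A.modify row.toNat (setCols w)) (createBoard w h_) := by
  unfold innerCells
  apply PySem.List.foldl_congr_mem
  intro A row hrow
  have hb : 1 ≤ row ∧ row < h_ - 1 := PySem.List.mem_pyRange_one.mp hrow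
  have h1 : ∀ (B : List (List Int)) (col : Int), col ∈ PySem.List.pyRange 1 (w - 1) 1 →
      (if 0 < row ∧ row < h_ - 1 ∧ 0 < col ∧ col < w - 1 then
        B.modify row.toNat (fun r => r.set col.toNat 1)
      else
        B.modify row.toNat (fun r => r.set col.toNat 0)) =
      B.modify row.toNat (fun r => r.set col.toNat 1) := by
    intro B col hcol
    have hc : 1 ≤ col ∧ col < w - 1 := PySem.List.mem_pyRange_one.mp hcol
    rw [if_pos ⟨by omega, by omega, by omega, by omega⟩]
  rw [show ∀ B : List (List Int), (PySem.List.pyRange 1 (w - 1) 1).foldl (fun A col =>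
      if 0 < row ∧ row < h_ - 1 ∧ 0 < col ∧ col < w - 1 then
        A.modify row.toNat (fun r => r.set col.toNat 1)
      else
        A.modify row.toNat (fun r => r.set col.toNat 0)) B =
      (PySem.List.pyRange 1 (w - 1) 1).foldl
        (fun A col => A.modify row.toNat (fun r => r.set col.toNat 1)) B from
    fun B => PySem.List.foldl_congr_mem _ _ _ B (fun acc x hx => h1 acc x hx)]
  unfold setCols
  induction (PySem.List.pyRange 1 (w - 1) 1) generalizing A with
  | nil => simp [modify_id_eq]
  | cons c cs ih =>
    simp only [List.foldl_cons]
    rw [ih (A.modify row.toNat fun r => r.set c.toNat 1), modify_modify_eq]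

-- the interior row template equals A's row after its inner loop
lemma setCols_replicate (w : Int) :
    setCols w (List.replicate w.toNat (0 : Int)) =
      if w < 2 then List.replicate (max w 0).toNat (0 : Int)
      else [0] ++ List.replicate (w - 2).toNat (1 : Int) ++ [0] := by
  by_cases hw : w < 2
  · have : PySem.List.pyRange 1 (w - 1) 1 = [] := PySem.List.pyRange_one_eq_nil (by omega)
    simp only [setCols, this, List.foldl_nil, if_pos hw]
    congr 1
    omega
  · rw [if_neg hw]
    apply List.ext_getElem
    · simp [length_setCols]; omega
    · intro j hj hj'
      have hjw : j < w.toNat := by simpa [length_setCols] using hj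
      rw [getElem_setCols w _ j (by simpa using hjw) hj]
      by_cases h0 : j = 0
      · subst h0
        simp
      · by_cases hmid : (j : Int) < w - 1
        · rw [if_pos ⟨by omega, hmid⟩]
          have hj1 : j < ([0] ++ List.replicate (w - 2).toNat (1 : Int)).length := by
            simp; omega
          rw [List.getElem_append_left hj1]
          simp [List.getElem_cons, h0]
        · rw [if_neg (by omega)]
          have hlast : j = w.toNat - 1 := by omega
          have hlen : ([0] ++ List.replicate (w - 2).toNat (1 : Int)).length ≤ j := by
            simp; omega
          rw [List.getElem_replicate, List.getElem_append_right hlen]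
          simp

-- ===== VERDICT (by name: the statement is the Claim_ definition above) =====
theorem innerCells_spec : Claim_equal_innerCells := by
  intro w h_ _
  show innerCells w h_ = innerCells_alt w h_
  rw [innerCells_eq_foldl_modify, createBoard_eq]
  unfold innerCells_alt
  by_cases hh : (max h_ 0).toNat = 0
  · rw [if_pos hh]
    have h0 : h_.toNat = 0 := by omega
    rw [h0, List.replicate_zero, PySem.List.pyRange_one_eq_nil (by omega)]
    rfl
  rw [if_neg hh]
  apply List.ext_getElem
  · simp [length_foldl_modify, PySem.List.length_pyRange_one]
    omega
  · intro i hi hi'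
    have hih : i < h_.toNat := by simpa [length_foldl_modify] using hi
    rw [getElem_foldl_modify _ _ (setCols_idem w) _ i (by simpa using hih) hi]
    rw [List.getElem_map]
    rw [PySem.List.getElem_pyRange_one]
    have hcond : (∃ r ∈ PySem.List.pyRange 1 (h_ - 1) 1, r.toNat = i) ↔
        (1 ≤ (i : Int) ∧ (i : Int) < h_ - 1) := by
      constructor
      · rintro ⟨r, hr, rfl⟩
        have := PySem.List.mem_pyRange_one.mp hr
        omega
      · rintro ⟨h1, h2⟩
        exact ⟨(i : Int), PySem.List.mem_pyRange_one.mpr ⟨by omega, by omega⟩, by omega⟩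
    have hzero : ((0 : Int) + (i : Int) = 0 ∨ (0 : Int) + (i : Int) = h_ - 1) ↔
        ¬ (1 ≤ (i : Int) ∧ (i : Int) < h_ - 1) := by omega
    rw [List.getElem_replicate]
    by_cases hmid : 1 ≤ (i : Int) ∧ (i : Int) < h_ - 1
    · rw [if_pos (hcond.mpr hmid), if_neg (by omega), setCols_replicate]
    · rw [if_neg (fun hc => hmid (hcond.mp hc)), if_pos (hzero.mpr hmid)]
      congr 1
      omega
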